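-- pv_equiv track=rewrite | github.com/DarianValdez/ElevatorSim | elevator.py | processTrip
-- ===== SOURCE A (Python) =====
-- timePerFloor = 10
--
-- def processTrip(currentFloor, floorsToVisit):
--     totalTravelTime = 0
--     orderOfFloorsVisited = []
--
--     sortedFloors = sorted(floorsToVisit)
--     orderOfFloorsVisited.append(currentFloor)
--
--     while sortedFloors:
--         closestFloor = min(sortedFloors, key=lambda x: abs(x - currentFloor))
--         travelTime = abs(closestFloor - currentFloor) * timePerFloor
--         totalTravelTime += travelTime
--         currentFloor = closestFloor
--         orderOfFloorsVisited.append(currentFloor)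
--         sortedFloors.remove(currentFloor)
--
--     return totalTravelTime, orderOfFloorsVisited
-- ===== SOURCE B (Python) =====
-- timePerFloor = 10
--
-- def processTrip(currentFloor, floorsToVisit):
--     s = sorted(floorsToVisit)
--     n = len(s)
--     # hi = index of first element >= currentFloor (hand-rolled bisect_left)
--     hi = 0
--     while hi < n and s[hi] < currentFloor:
--         hi += 1
--     lo = hi - 1
--     totalTravelTime = 0
--     order = [currentFloor]
--     cur = currentFloor
--     while lo >= 0 or hi < n:
--         if lo >= 0 and (hi >= n or cur - s[lo] <= s[hi] - cur):
--             nxt = s[lo]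
--             totalTravelTime += (cur - nxt) * timePerFloor
--             lo -= 1
--         else:
--             nxt = s[hi]
--             totalTravelTime += (nxt - cur) * timePerFloor
--             hi += 1
--         order.append(nxt)
--         cur = nxt
--     return totalTravelTime, order
-- ===== Notes on version B (the rewrite author's own statement) =====
-- stated objective: faster
-- what changed: A repeatedly scans the whole remaining list with min(key=abs distance) and list.remove (O(n^2)); B sorts once, finds the start position with a bisect-style scan, and then expands outward with two pointers, picking the nearer of the two boundary floors (lower on ties) in O(1) per step.
import Mathlib
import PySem

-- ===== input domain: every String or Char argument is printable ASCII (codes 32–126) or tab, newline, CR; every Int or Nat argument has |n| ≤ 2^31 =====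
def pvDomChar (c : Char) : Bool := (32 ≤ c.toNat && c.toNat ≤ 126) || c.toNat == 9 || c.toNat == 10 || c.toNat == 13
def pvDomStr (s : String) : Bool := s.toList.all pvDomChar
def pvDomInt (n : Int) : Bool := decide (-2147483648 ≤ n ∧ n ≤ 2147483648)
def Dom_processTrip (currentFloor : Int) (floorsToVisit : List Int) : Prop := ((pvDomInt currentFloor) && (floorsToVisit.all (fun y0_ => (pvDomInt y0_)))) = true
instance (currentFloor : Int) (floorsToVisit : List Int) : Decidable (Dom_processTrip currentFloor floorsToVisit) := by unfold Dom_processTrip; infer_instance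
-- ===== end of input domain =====

-- B replaces A's quadratic "min over the remaining floors, then remove" loop by sort + two pointers
-- expanding outward from the start floor (preferring the lower floor on ties): a faster algorithm.

def timePerFloor : Int := 10

-- ===== PORT A =====
-- the while loop; fuel is a pure totality device (one unit per iteration: the list
-- shrinks by one element each pass, so fuel = initial length is exact)
def processTripLoop : Nat → Int → List Int → Int → List Int → Int × List Int
  | 0, _, _, totalTravelTime, orderOfFloorsVisited => (totalTravelTime, orderOfFloorsVisited)
  | fuel + 1, currentFloor, sortedFloors, totalTravelTime, orderOfFloorsVisited =>
    match PySem.List.min? sortedFloors (fun x => (x - currentFloor).natAbs) with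
    | none => (totalTravelTime, orderOfFloorsVisited)
    | some closestFloor =>
        match PySem.List.remove? sortedFloors closestFloor with
        | none => (totalTravelTime, orderOfFloorsVisited)  -- unreachable: closestFloor ∈ sortedFloors
        | some rest =>
            processTripLoop fuel closestFloor rest
              (totalTravelTime + ((closestFloor - currentFloor).natAbs : Int) * timePerFloor)
              (orderOfFloorsVisited ++ [closestFloor])

def processTrip (currentFloor : Int) (floorsToVisit : List Int) : Int × List Int :=
  processTripLoop (PySem.List.sorted floorsToVisit (fun x => x) false).length currentFloor
    (PySem.List.sorted floorsToVisit (fun x => x) false) 0 [currentFloor]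

-- ===== PORT B =====
-- hand-rolled bisect_left of Source B: first index hi with ¬ (s[hi] < currentFloor);
-- fuel is a totality device (hi rises by one per pass, so fuel = length is enough)
def findStart : Nat → List Int → Int → Nat → Nat
  | 0, _, _, hi => hi
  | fuel + 1, s, currentFloor, hi =>
    if hi < s.length ∧ s.getD hi 0 < currentFloor then findStart fuel s currentFloor (hi + 1) else hi

-- two-pointer loop of Source B; p = lo + 1 (so "lo ≥ 0" is "0 < p");
-- fuel is a totality device (each pass visits one floor, so fuel = length is exact)
def tripLoop : Nat → List Int → Int → Nat → Nat → Int → List Int → Int × List Int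
  | 0, _, _, _, _, tot, ord => (tot, ord)
  | fuel + 1, s, cur, p, q, tot, ord =>
    if 0 < p ∨ q < s.length then
      if 0 < p ∧ (s.length ≤ q ∨ cur - s.getD (p - 1) 0 ≤ s.getD q 0 - cur) then
        let nxt := s.getD (p - 1) 0
        tripLoop fuel s nxt (p - 1) q (tot + (cur - nxt) * timePerFloor) (ord ++ [nxt])
      else
        let nxt := s.getD q 0
        tripLoop fuel s nxt p (q + 1) (tot + (nxt - cur) * timePerFloor) (ord ++ [nxt])
    else (tot, ord)

def processTrip_alt (currentFloor : Int) (floorsToVisit : List Int) : Int × List Int :=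
  let s := PySem.List.sorted floorsToVisit (fun x => x) false
  let q := findStart s.length s currentFloor 0
  tripLoop s.length s currentFloor q q 0 [currentFloor]

-- ===== PRECONDITION & SPEC =====
def Spec_processTrip (currentFloor : Int) (floorsToVisit : List Int) (out : Int × List Int) : Prop := out = processTrip_alt currentFloor floorsToVisit
instance (currentFloor : Int) (floorsToVisit : List Int) (out : Int × List Int) : Decidable (Spec_processTrip currentFloor floorsToVisit out) := by unfold Spec_processTrip; infer_instance

-- ===== CLAIM (what is proved, stated in full; the proofs are below) =====
def Claim_equal_processTrip : Prop := ∀ (currentFloor : Int) (floorsToVisit : List Int), Dom_processTrip currentFloor floorsToVisit → Spec_processTrip currentFloor floorsToVisit (processTrip currentFloor floorsToVisit)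

-- ===== LEMMAS AND PROOFS =====

-- the fold step inside PySem.List.min? with key (· - c).natAbs
def minStep (c : Int) (acc : Option Int) (x : Int) : Option Int :=
  match acc with
  | none => some x
  | some m => if (x - c).natAbs < (m - c).natAbs then some x else some m

theorem min?_eq_foldl_minStep (c : Int) (xs : List Int) :
    PySem.List.min? xs (fun x => (x - c).natAbs) = xs.foldl (minStep c) none := by
  simp only [PySem.List.min?]
  congr 1
  funext acc x
  cases acc <;> rfl

-- keep the accumulator when nothing beats it
theorem foldl_minStep_keep (c m : Int) : ∀ (S : List Int),
    (∀ x ∈ S, ¬ ((x - c).natAbs < (m - c).natAbs)) → S.foldl (minStep c) (some m) = some m := by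
  intro S
  induction S with
  | nil => intro _; rfl
  | cons w S' ih =>
    intro h
    have hw := h w (by simp)
    simp only [List.foldl_cons, minStep, if_neg hw]
    exact ih (fun x hx => h x (by simp [hx]))

-- over a sorted prefix all ≤ c the fold keeps the last element
theorem foldl_minStep_prefix (c : Int) : ∀ (P : List Int) (a : Int),
    (a :: P).Pairwise (· ≤ ·) → (∀ x ∈ a :: P, x ≤ c) →
    P.foldl (minStep c) (some a) = some (P.getLastD a) := by
  intro P
  induction P with
  | nil => intro a _ _; rfl
  | cons x P' ih =>
    intro a hp hc
    have hax : a ≤ x := (List.pairwise_cons.mp hp).1 x (by simp)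
    have hxc : x ≤ c := hc x (by simp)
    have hac : a ≤ c := hc a (by simp)
    have hp' : (x :: P').Pairwise (· ≤ ·) := (List.pairwise_cons.mp hp).2
    have hc' : ∀ y ∈ x :: P', y ≤ c := fun y hy => hc y (by simp [hy])
    simp only [List.foldl_cons, List.getLastD_cons]
    by_cases hlt : (x - c).natAbs < (a - c).natAbs
    · simp only [minStep, if_pos hlt]
      exact ih x hp' hc'
    · have hxa : x = a := by omega
      simp only [minStep, if_neg hlt]
      subst hxa
      exact ih x hp' hc'

-- the element the suffix fold ends with
def suffixPick (c v : Int) : List Int → Int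
  | [] => v
  | w :: _ => if (w - c).natAbs < (v - c).natAbs then w else v

-- over a sorted suffix all ≥ c, starting from v ≤ c, the result is head-or-v
theorem foldl_minStep_suffix (c v : Int) (S : List Int)
    (hS : S.Pairwise (· ≤ ·)) (hc : ∀ x ∈ S, c ≤ x) (hv : v ≤ c) :
    S.foldl (minStep c) (some v) = some (suffixPick c v S) := by
  cases S with
  | nil => rfl
  | cons w S' =>
    have hwc : c ≤ w := hc w (by simp)
    have hwS' : ∀ x ∈ S', w ≤ x := (List.pairwise_cons.mp hS).1
    by_cases hlt : (w - c).natAbs < (v - c).natAbs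
    · simp only [List.foldl_cons, minStep, if_pos hlt, suffixPick]
      apply foldl_minStep_keep
      intro x hx
      have hcx : c ≤ x := hc x (by simp [hx])
      have := hwS' x hx
      omega
    · simp only [List.foldl_cons, minStep, if_neg hlt, suffixPick]
      apply foldl_minStep_keep
      intro x hx
      have hcx : c ≤ x := hc x (by simp [hx])
      have := hwS' x hx
      omega

-- sorted lists: every element is ≤ the last
theorem le_getLast_of_pairwise : ∀ {P : List Int} {v : Int},
    P.Pairwise (· ≤ ·) → P.getLast? = some v → ∀ x ∈ P, x ≤ v := by
  intro P
  induction P with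
  | nil => intro v _ h; simp at h
  | cons a P' ih =>
    intro v hp hl x hx
    cases hP' : P' with
    | nil =>
      subst hP'; simp at hl hx
      omega
    | cons b t =>
      have hne : P' ≠ [] := by rw [hP']; simp
      have hl' : P'.getLast? = some v := by
        rw [List.getLast?_cons] at hl
        cases hg : P'.getLast? with
        | none => exact absurd (List.getLast?_eq_none_iff.mp hg) hne
        | some u => rw [hg] at hl; simp at hl; simp [hl]
      have hvP' : v ∈ P' := List.mem_of_getLast? hl'
      rcases List.mem_cons.mp hx with hxa | hxP'
      · subst hxa
        exact (List.pairwise_cons.mp hp).1 v hvP'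
      · exact ih (List.pairwise_cons.mp hp).2 hl' x (by rw [hP']; rwa [hP'] at hxP')

-- remove the last element of a sorted block sitting in front of S
theorem remove?_sorted_last (v : Int) : ∀ (P S : List Int),
    P.Pairwise (· ≤ ·) → P.getLast? = some v →
    PySem.List.remove? (P ++ S) v = some (P.dropLast ++ S) := by
  intro P
  induction P with
  | nil => intro S _ h; simp at h
  | cons x P' ih =>
    intro S hp hl
    by_cases hx : x = v
    · subst hx
      rw [List.cons_append, PySem.List.remove?_cons_self]
      -- head = last = x forces every element of x :: P' to equal x
      have hle := le_getLast_of_pairwise hp hl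
      have hge : ∀ y ∈ P', x ≤ y := (List.pairwise_cons.mp hp).1
      have hall : ∀ y ∈ P', y = x := by
        intro y hy
        have h1 := hle y (by simp [hy])
        have h2 := hge y hy
        omega
      have hrep : P' = List.replicate P'.length x :=
        List.eq_replicate_of_mem hall
      have halld : ∀ y ∈ (x :: P').dropLast, y = x := by
        intro y hy
        have hy2 : y ∈ x :: P' := List.Sublist.mem hy (List.dropLast_sublist _)
        rcases List.mem_cons.mp hy2 with h | h
        · exact h
        · exact hall y h
      have hrepd : (x :: P').dropLast = List.replicate P'.length x := by
        have := List.eq_replicate_of_mem halld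
        rwa [List.length_dropLast, List.length_cons, Nat.add_sub_cancel] at this
      rw [hrepd, ← hrep]
    · have hP'ne : P' ≠ [] := by
        intro h; subst h; simp at hl; exact hx hl
      have hl' : P'.getLast? = some v := by
        rw [List.getLast?_cons] at hl
        cases hg : P'.getLast? with
        | none => exact absurd (List.getLast?_eq_none_iff.mp hg) hP'ne
        | some u => rw [hg] at hl; simp at hl; simp [hl]
      rw [List.cons_append, PySem.List.remove?_cons_of_ne _ hx,
          ih S (List.pairwise_cons.mp hp).2 hl']
      simp [List.dropLast_cons_of_ne_nil hP'ne]

-- remove v = head of S when v is not in the prefix P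
theorem remove?_not_mem_prefix (v : Int) : ∀ (P S : List Int),
    v ∉ P → PySem.List.remove? (P ++ v :: S) v = some (P ++ S) := by
  intro P
  induction P with
  | nil => intro S _; simp [PySem.List.remove?_cons_self]
  | cons x P' ih =>
    intro S hv
    have hx : x ≠ v := fun h => hv (by simp [h])
    rw [List.cons_append, PySem.List.remove?_cons_of_ne _ hx, ih S (fun h => hv (by simp [h]))]
    simp

-- one unfolded step of A's loop
theorem processTripLoop_step {c : Int} {fs : List Int} {m : Int} {r : List Int} (f : Nat) (t : Int) (o : List Int)
    (hmin : PySem.List.min? fs (fun x => (x - c).natAbs) = some m)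
    (hrem : PySem.List.remove? fs m = some r) :
    processTripLoop (f + 1) c fs t o = processTripLoop f m r (t + ((m - c).natAbs : Int) * timePerFloor) (o ++ [m]) := by
  simp only [processTripLoop, hmin, hrem]

-- findStart facts
theorem findStart_le (s : List Int) (c : Int) : ∀ (f hi : Nat), hi ≤ s.length →
    findStart f s c hi ≤ s.length := by
  intro f
  induction f with
  | zero => intro hi h; exact h
  | succ f ih =>
    intro hi h
    by_cases hcond : hi < s.length ∧ s.getD hi 0 < c
    · rw [findStart, if_pos hcond]; exact ih (hi + 1) (by omega)
    · rw [findStart, if_neg hcond]; exact h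

theorem findStart_below (s : List Int) (c : Int) : ∀ (f hi : Nat),
    ∀ i, hi ≤ i → i < findStart f s c hi → s.getD i 0 < c := by
  intro f
  induction f with
  | zero => intro hi i h1 h2; simp only [findStart] at h2; omega
  | succ f ih =>
    intro hi i h1 h2
    by_cases hcond : hi < s.length ∧ s.getD hi 0 < c
    · rw [findStart, if_pos hcond] at h2
      rcases Nat.eq_or_lt_of_le h1 with h | h
      · subst h; exact hcond.2
      · exact ih (hi + 1) i h h2
    · rw [findStart, if_neg hcond] at h2
      omega

theorem findStart_stop (s : List Int) (c : Int) : ∀ (f hi : Nat), s.length ≤ f + hi →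
    findStart f s c hi < s.length → c ≤ s.getD (findStart f s c hi) 0 := by
  intro f
  induction f with
  | zero =>
    intro hi hf h
    simp only [findStart] at h ⊢
    omega
  | succ f ih =>
    intro hi hf h
    by_cases hcond : hi < s.length ∧ s.getD hi 0 < c
    · rw [findStart, if_pos hcond] at h ⊢
      exact ih (hi + 1) (by omega) h
    · rw [findStart, if_neg hcond] at h ⊢
      exact le_of_not_gt (fun hgt => hcond ⟨h, hgt⟩)

-- last element of a prefix, as a getD
theorem getD_take_last (s : List Int) (p : Nat) (hp : 0 < p) (hlen : p ≤ s.length) :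
    (s.take p).getLast? = some (s.getD (p - 1) 0) := by
  have h2 : p - 1 < s.length := by omega
  rw [List.getLast?_eq_getElem?]
  have hlt : (s.take p).length - 1 = p - 1 := by simp [List.length_take]; omega
  rw [hlt, List.getElem?_take, if_pos (by omega), List.getD_eq_getElem s 0 h2,
      List.getElem?_eq_getElem h2]

-- ===== the main loop correspondence =====
theorem loop_eq (s : List Int) (hs : s.Pairwise (· ≤ ·)) :
    ∀ (n p q : Nat) (cur tot : Int) (ord : List Int),
      n = p + (s.length - q) →
      p ≤ q → q ≤ s.length →
      (∀ i, i < p → s.getD i 0 ≤ cur) →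
      (∀ i, q ≤ i → i < s.length → cur ≤ s.getD i 0) →
      processTripLoop n cur (s.take p ++ s.drop q) tot ord = tripLoop n s cur p q tot ord := by
  have hmono : ∀ i j, j < s.length → i ≤ j → s.getD i 0 ≤ s.getD j 0 := by
    intro i j hj hij
    have hi : i < s.length := by omega
    rw [List.getD_eq_getElem s 0 hi, List.getD_eq_getElem s 0 hj]
    rcases Nat.eq_or_lt_of_le hij with h | h
    · subst h; rfl
    · exact List.pairwise_iff_getElem.mp hs i j hi hj h
  intro n
  induction n with
  | zero => intro p q cur tot ord hn hpq hql _ _; rfl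
  | succ n ih =>
    intro p q cur tot ord hn hpq hql hlow hhigh
    have hw : 0 < p ∨ q < s.length := by omega
    have hPsorted : (s.take p).Pairwise (· ≤ ·) := hs.sublist (List.take_sublist p s)
    have hSsorted : (s.drop q).Pairwise (· ≤ ·) := hs.sublist (List.drop_sublist q s)
    have hPle : ∀ x ∈ s.take p, x ≤ cur := by
      intro x hx
      rw [List.mem_take_iff_getElem] at hx
      obtain ⟨i, hi, hxe⟩ := hx
      have hi' : i < p := by omega
      have hilen : i < s.length := by omega
      have := hlow i hi'
      rwa [List.getD_eq_getElem s 0 hilen, hxe] at this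
    have hSge : ∀ x ∈ s.drop q, cur ≤ x := by
      intro x hx
      rw [List.mem_drop_iff_getElem] at hx
      obtain ⟨i, hi, hxe⟩ := hx
      have := hhigh (q + i) (by omega) (by omega)
      rwa [List.getD_eq_getElem s 0 (by omega), hxe] at this
    have hfold : PySem.List.min? (s.take p ++ s.drop q) (fun x => (x - cur).natAbs)
        = (s.drop q).foldl (minStep cur) ((s.take p).foldl (minStep cur) none) := by
      rw [min?_eq_foldl_minStep, List.foldl_append]
    by_cases hl : 0 < p ∧ (s.length ≤ q ∨ cur - s.getD (p - 1) 0 ≤ s.getD q 0 - cur)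
    case pos =>
      -- B picks the left candidate v = s[p-1]
      set v := s.getD (p - 1) 0 with hv
      have hp : 0 < p := hl.1
      have hplen : p - 1 < s.length := by omega
      have hvle : v ≤ cur := hlow (p - 1) (by omega)
      have hlast : (s.take p).getLast? = some v := getD_take_last s p hp (by omega)
      have hminP : (s.take p).foldl (minStep cur) none = some v := by
        cases hP : s.take p with
        | nil => rw [hP] at hlast; cases hlast
        | cons a P' =>
          have hstep : (a :: P').foldl (minStep cur) none = P'.foldl (minStep cur) (some a) := by
            simp [minStep]
          rw [hP] at hPsorted hPle hlast
          rw [hstep, foldl_minStep_prefix cur P' a hPsorted hPle]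
          rw [List.getLast?_cons] at hlast
          cases hg : P'.getLast? with
          | none =>
            rw [hg] at hlast; simp at hlast
            rw [List.getLast?_eq_none_iff.mp hg]
            simpa using hlast
          | some u =>
            rw [hg] at hlast; simp at hlast
            rw [List.getLastD_eq_getLast?, hg]
            simpa using hlast
      have hmin : PySem.List.min? (s.take p ++ s.drop q) (fun x => (x - cur).natAbs) = some v := by
        rw [hfold, hminP,
            foldl_minStep_suffix cur v (s.drop q) hSsorted hSge hvle]
        by_cases hq2 : q < s.length
        · rw [List.drop_eq_getElem_cons hq2]
          have hcond : cur - v ≤ s.getD q 0 - cur := by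
            rcases hl.2 with h | h
            · omega
            · exact h
          have hwc : cur ≤ s.getD q 0 := hhigh q (le_refl q) hq2
          rw [List.getD_eq_getElem s 0 hq2] at hcond hwc
          have hnot : ¬ ((s[q] - cur).natAbs < (v - cur).natAbs) := by omega
          simp [suffixPick, hnot]
        · rw [List.drop_eq_nil_of_le (by omega)]
          rfl
      have hrem : PySem.List.remove? (s.take p ++ s.drop q) v = some (s.take (p - 1) ++ s.drop q) := by
        have := remove?_sorted_last v (s.take p) (s.drop q) hPsorted hlast
        have hdt : (s.take p).dropLast = s.take (p - 1) := by
          rw [List.dropLast_eq_take, List.take_take, List.length_take]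
          have hm : min (min p s.length - 1) p = p - 1 := by omega
          rw [hm]
        rwa [hdt] at this
      rw [processTripLoop_step n tot ord hmin hrem]
      rw [tripLoop, if_pos hw, if_pos hl]
      have hnat : ((v - cur).natAbs : Int) = cur - v := by omega
      rw [hnat]
      exact ih (p - 1) q v _ _ (by omega) (by omega) hql
        (fun i hi => hmono i (p - 1) hplen (by omega))
        (fun i h1 h2 => le_trans hvle (hhigh i h1 h2))
    case neg =>
      -- B picks the right candidate w = s[q]
      have hq : q < s.length := by
        rcases hw with hp | hq
        · by_contra h
          exact hl ⟨hp, Or.inl (by omega)⟩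
        · exact hq
      set w := s.getD q 0 with hwdef
      have hwc : cur ≤ w := hhigh q (le_refl q) hq
      have hdropq : s.drop q = w :: s.drop (q + 1) := by
        rw [List.drop_eq_getElem_cons hq, hwdef, List.getD_eq_getElem s 0 hq]
      have hmin : PySem.List.min? (s.take p ++ s.drop q) (fun x => (x - cur).natAbs) = some w := by
        rw [hfold]
        by_cases hp : 0 < p
        · have hcond : ¬ (cur - s.getD (p - 1) 0 ≤ s.getD q 0 - cur) := by
            intro h; exact hl ⟨hp, Or.inr h⟩
          set v := s.getD (p - 1) 0 with hv
          have hvle : v ≤ cur := hlow (p - 1) (by omega)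
          have hlast : (s.take p).getLast? = some v := getD_take_last s p hp (by omega)
          have hminP : (s.take p).foldl (minStep cur) none = some v := by
            cases hP : s.take p with
            | nil => rw [hP] at hlast; cases hlast
            | cons a P' =>
              have hstep : (a :: P').foldl (minStep cur) none = P'.foldl (minStep cur) (some a) := by
                simp [minStep]
              rw [hP] at hPsorted hPle hlast
              rw [hstep, foldl_minStep_prefix cur P' a hPsorted hPle]
              rw [List.getLast?_cons] at hlast
              cases hg : P'.getLast? with
              | none =>
                rw [hg] at hlast; simp at hlast
                rw [List.getLast?_eq_none_iff.mp hg]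
                simpa using hlast
              | some u =>
                rw [hg] at hlast; simp at hlast
                rw [List.getLastD_eq_getLast?, hg]
                simpa using hlast
          rw [hminP, foldl_minStep_suffix cur v (s.drop q) hSsorted hSge hvle, hdropq]
          have hlt : (w - cur).natAbs < (v - cur).natAbs := by
            rw [hwdef, hv]; rw [hwdef] at hwc; omega
          simp [suffixPick, hlt]
        · have hp0 : p = 0 := by omega
          subst hp0
          rw [List.take_zero, List.foldl_nil, hdropq]
          have hstep : (w :: s.drop (q + 1)).foldl (minStep cur) none
              = (s.drop (q + 1)).foldl (minStep cur) (some w) := by simp [minStep]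
          rw [hstep]
          apply foldl_minStep_keep
          intro x hx
          have hxw : w ≤ x := by
            rw [List.mem_drop_iff_getElem] at hx
            obtain ⟨i, hi, hxe⟩ := hx
            have hm := hmono q (q + 1 + i) (by omega) (by omega)
            rw [List.getD_eq_getElem s 0 (by omega : q + 1 + i < s.length), hxe] at hm
            rw [hwdef]
            exact hm
          omega
      have hwnot : w ∉ s.take p := by
        intro hmem
        have hwle : w ≤ cur := hPle w hmem
        have hweq : w = cur := le_antisymm hwle hwc
        have hp : 0 < p := by
          by_contra h
          have hp0 : p = 0 := by omega
          rw [hp0, List.take_zero] at hmem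
          cases hmem
        have hcle : cur ≤ s.getD (p - 1) 0 := by
          rw [List.mem_take_iff_getElem] at hmem
          obtain ⟨i, hi, hxe⟩ := hmem
          have h1 := hmono i (p - 1) (by omega) (by omega)
          rw [List.getD_eq_getElem s 0 (by omega : i < s.length), hxe] at h1
          rw [← hweq]
          exact h1
        have h2 := hlow (p - 1) (by omega)
        exact hl ⟨hp, Or.inr (by omega)⟩
      have hrem : PySem.List.remove? (s.take p ++ s.drop q) w = some (s.take p ++ s.drop (q + 1)) := by
        rw [hdropq]
        exact remove?_not_mem_prefix w (s.take p) (s.drop (q + 1)) hwnot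
      rw [processTripLoop_step n tot ord hmin hrem]
      rw [tripLoop, if_pos hw, if_neg hl]
      have hnat : ((w - cur).natAbs : Int) = w - cur := by omega
      rw [hnat]
      exact ih p (q + 1) w _ _ (by omega) (by omega) (by omega)
        (fun i hi => le_trans (hlow i hi) hwc)
        (fun i h1 h2 => hmono q i h2 (by omega))

-- ===== VERDICT (by name: the statement is the Claim_ definition above) =====
theorem processTrip_spec : Claim_equal_processTrip := by
  intro currentFloor floorsToVisit _
  unfold Spec_processTrip processTrip processTrip_alt
  set s := PySem.List.sorted floorsToVisit (fun x => x) false with hsdef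
  have hs : s.Pairwise (· ≤ ·) := PySem.List.sorted_pairwise floorsToVisit (fun x => x)
  set q := findStart s.length s currentFloor 0 with hqdef
  have hql : q ≤ s.length := findStart_le s currentFloor s.length 0 (by omega)
  have hhigh : ∀ i, q ≤ i → i < s.length → currentFloor ≤ s.getD i 0 := by
    intro i h1 h2
    have hqlt : q < s.length := by omega
    have hstop : currentFloor ≤ s.getD q 0 := findStart_stop s currentFloor s.length 0 (by omega) hqlt
    rcases Nat.eq_or_lt_of_le h1 with he | hlt
    · rwa [← he]
    · refine le_trans hstop ?_
      rw [List.getD_eq_getElem s 0 hqlt, List.getD_eq_getElem s 0 h2]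
      exact List.pairwise_iff_getElem.mp hs q i hqlt h2 hlt
  have h := loop_eq s hs s.length q q currentFloor 0 [currentFloor]
    (by omega) (le_refl q) hql
    (fun i hi => le_of_lt (findStart_below s currentFloor s.length 0 i (by omega) hi))
    hhigh
  rw [List.take_append_drop] at h
  exact h
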